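-- pv_equiv track=rewrite | github.com/arturoornelasb/tibia-bonelord-469-cipher | archive/scripts/experimental/checkerboard_search.py | find_tokenizations
-- ===== SOURCE A (Python) =====
-- def find_tokenizations(text, target_tokens, max_len=3):
--     """Find all tokenizations into exactly target_tokens tokens."""
--     n = len(text)
--     results = []
--
--     def backtrack(pos, tokens):
--         if len(tokens) == target_tokens:
--             if pos == n:
--                 results.append(list(tokens))
--             return
--         if pos >= n:
--             return
--         remaining_chars = n - pos
--         remaining_tokens = target_tokens - len(tokens)
--         if remaining_chars < remaining_tokens or remaining_chars > remaining_tokens * max_len: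
--             return
--         for l in range(1, min(max_len + 1, remaining_chars + 1)):
--             tokens.append(text[pos:pos+l])
--             backtrack(pos + l, tokens)
--             tokens.pop()
--
--     backtrack(0, [])
--     return results
-- ===== SOURCE B (Python) =====
-- def find_tokenizations(text, target_tokens, max_len=3):
--     """Find all tokenizations into exactly target_tokens tokens.
--
--     Bottom-up tabulation: ways[pos] holds every tokenization of text[pos:]
--     into j tokens, rebuilt level by level for j = 0 .. target_tokens."""
--     n = len(text)
--     if target_tokens < 0:
--         return []
--     # level 0: only the empty suffix splits into 0 tokens
--     ways = [[] for _ in range(n)] + [[[]]]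
--     for _ in range(target_tokens):
--         ways = [[[text[pos:pos + l]] + rest
--                  for l in range(1, min(max_len, n - pos) + 1)
--                  for rest in ways[pos + l]]
--                 for pos in range(n + 1)]
--         if not any(ways):
--             return []
--     return ways[0]
-- ===== Notes on version B (the rewrite author's own statement) =====
-- stated objective: alternative
-- what changed: Replaces the mutating pruned DFS backtracker with a bottom-up level-by-level tabulation: a table ways[pos] of all tokenizations of the suffix text[pos:] into j tokens is rebuilt for each token count j, and the answer is read off at position 0.
import Mathlib
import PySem

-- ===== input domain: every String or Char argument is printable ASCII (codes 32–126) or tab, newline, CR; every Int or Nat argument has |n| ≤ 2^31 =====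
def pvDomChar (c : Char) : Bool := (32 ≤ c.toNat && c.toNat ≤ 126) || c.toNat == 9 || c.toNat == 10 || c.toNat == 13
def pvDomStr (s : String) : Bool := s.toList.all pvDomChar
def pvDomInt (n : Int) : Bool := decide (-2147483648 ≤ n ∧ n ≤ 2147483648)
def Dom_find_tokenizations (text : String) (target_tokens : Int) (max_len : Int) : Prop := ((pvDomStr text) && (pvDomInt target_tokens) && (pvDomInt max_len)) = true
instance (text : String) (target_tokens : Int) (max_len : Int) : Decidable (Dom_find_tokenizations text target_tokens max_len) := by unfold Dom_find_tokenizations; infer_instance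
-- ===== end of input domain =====

-- B replaces A's mutating pruned DFS backtracker by a bottom-up level-by-level tabulation
-- over suffix positions (objective: alternative; return values proved equal on the whole domain).

-- ===== PORT A =====
-- backtrack(pos, tokens): fuel only makes the recursion structural; the top call passes
-- fuel = len(text)+1 while the recursion depth is bounded by len(text), so 0 is never reached.
def btA (text : String) (target max_len n : Int) : Nat → Int → List String → List (List String) → List (List String)
  | 0, _, _, results => results
  | fuel+1, pos, tokens, results =>
    if (tokens.length : Int) = target then
      (if pos = n then results ++ [tokens] else results)
    else if n ≤ pos then results
    else if n - pos < target - (tokens.length : Int) ∨ (target - (tokens.length : Int)) * max_len < n - pos then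
      results
    else
      (PySem.List.pyRange 1 (min (max_len + 1) (n - pos + 1)) 1).foldl
        (fun res l => btA text target max_len n fuel (pos + l)
          (tokens ++ [PySem.Str.slice text (some pos) (some (pos + l))]) res)
        results

def find_tokenizations (text : String) (target_tokens : Int) (max_len : Int) : List (List String) :=
  btA text target_tokens max_len (PySem.Str.len text) ((PySem.Str.len text).toNat + 1) 0 [] []

-- ===== PORT B =====
-- one level of the tabulation: the inner list comprehension of Source B
-- (the index pos+l always lies inside the (n+1)-entry table, so pyGetD's default is never used)
def tokTable (text : String) (n max_len : Int) (ways : List (List (List String))) : List (List (List String)) :=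
  (PySem.List.pyRange 0 (n + 1) 1).map (fun pos =>
    (PySem.List.pyRange 1 (min max_len (n - pos) + 1) 1).flatMap (fun l =>
      (PySem.List.pyGetD ways (pos + l) []).map
        (fun rest => PySem.Str.slice text (some pos) (some (pos + l)) :: rest)))

-- the 'for _ in range(target_tokens)' loop with its early 'return []' when every entry is empty
def tokLoop (text : String) (n max_len : Int) : Nat → List (List (List String)) → List (List String)
  | 0, ways => PySem.List.pyGetD ways 0 []
  | steps+1, ways =>
      let ways' := tokTable text n max_len ways
      if ways'.any (fun t => !t.isEmpty) then tokLoop text n max_len steps ways'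
      else []

def find_tokenizations_alt (text : String) (target_tokens : Int) (max_len : Int) : List (List String) :=
  if target_tokens < 0 then []
  else
    tokLoop text (PySem.Str.len text) max_len target_tokens.toNat
      (List.replicate (PySem.Str.len text).toNat [] ++ [[[]]])

-- ===== PRECONDITION & SPEC =====
def Spec_find_tokenizations (text : String) (target_tokens : Int) (max_len : Int) (out : List (List String)) : Prop := out = find_tokenizations_alt text target_tokens max_len
instance (text : String) (target_tokens : Int) (max_len : Int) (out : List (List String)) : Decidable (Spec_find_tokenizations text target_tokens max_len out) := by unfold Spec_find_tokenizations; infer_instance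

-- ===== CLAIM (what is proved, stated in full; the proofs are below) =====
def Claim_equal_find_tokenizations : Prop := ∀ (text : String) (target_tokens : Int) (max_len : Int), Dom_find_tokenizations text target_tokens max_len → Spec_find_tokenizations text target_tokens max_len (find_tokenizations text target_tokens max_len)

-- ===== LEMMAS AND PROOFS =====

-- the common mathematical value: all tokenizations of text[pos:] into j tokens of length ≤ max_len
def Wtok (text : String) (n max_len : Int) : Nat → Int → List (List String)
  | 0, pos => if pos = n then [[]] else []
  | j+1, pos =>
      (PySem.List.pyRange 1 (min max_len (n - pos) + 1) 1).flatMap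
        (fun l => (Wtok text n max_len j (pos + l)).map
          (fun rest => PySem.Str.slice text (some pos) (some (pos + l)) :: rest))

theorem Wtok_empty (text : String) (n max_len : Int) (j : Nat) (pos : Int)
    (h : n - pos < j ∨ (j : Int) * max_len < n - pos) :
    Wtok text n max_len j pos = [] := by
  induction j generalizing pos with
  | zero =>
    simp only [Wtok]
    rw [if_neg]; omega
  | succ j ih =>
    simp only [Wtok]
    apply List.flatMap_eq_nil_iff.mpr
    intro l hl
    rw [PySem.List.mem_pyRange_one] at hl
    have hml : l ≤ max_len := by omega
    have key : n - (pos + l) < (j:Int) ∨ (j:Int) * max_len < n - (pos + l) := by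
      rcases h with h | h
      · exact Or.inl (by omega)
      · refine Or.inr ?_
        push_cast at h
        ring_nf at h
        nlinarith
    rw [ih (pos + l) key]
    simp

theorem btA_eq (text : String) (target max_len n : Int) (fuel : Nat) (j : Nat) (pos : Int)
    (tokens : List String) (results : List (List String))
    (h0 : 0 ≤ pos) (h1 : pos ≤ n) (hf : (n - pos).toNat < fuel)
    (hj : (tokens.length : Int) + j = target) :
    btA text target max_len n fuel pos tokens results
      = results ++ (Wtok text n max_len j pos).map (tokens ++ ·) := by
  induction fuel generalizing j pos tokens results with
  | zero => omega
  | succ fuel ih =>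
    simp only [btA]
    rcases j with _ | j'
    · have hc : (tokens.length : Int) = target := by omega
      rw [if_pos hc]
      simp only [Wtok]
      by_cases hpn : pos = n
      · simp [hpn]
      · simp [hpn]
    · have hc : ¬ (tokens.length : Int) = target := by push_cast at hj; omega
      rw [if_neg hc]
      have hjt : target - (tokens.length : Int) = ((j' + 1 : Nat) : Int) := by omega
      by_cases hpe : n ≤ pos
      · rw [if_pos hpe]
        rw [Wtok_empty text n max_len (j' + 1) pos (Or.inl (by push_cast; omega))]
        simp
      · rw [if_neg hpe]
        by_cases hprune : n - pos < target - (tokens.length : Int) ∨ (target - (tokens.length : Int)) * max_len < n - pos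
        · rw [if_pos hprune]
          rw [hjt] at hprune
          rw [Wtok_empty text n max_len (j' + 1) pos hprune]
          simp
        · rw [if_neg hprune]
          rw [hjt] at hprune
          push Not at hprune
          have hmin : min (max_len + 1) (n - pos + 1) = min max_len (n - pos) + 1 := by omega
          rw [hmin]
          have hcong : ∀ (acc : List (List String)) (l : Int),
              l ∈ PySem.List.pyRange 1 (min max_len (n - pos) + 1) 1 →
              btA text target max_len n fuel (pos + l)
                (tokens ++ [PySem.Str.slice text (some pos) (some (pos + l))]) acc
              = acc ++ (Wtok text n max_len j' (pos + l)).map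
                  ((tokens ++ [PySem.Str.slice text (some pos) (some (pos + l))]) ++ ·) := by
            intro acc l hl
            rw [PySem.List.mem_pyRange_one] at hl
            have hb1 : 1 ≤ l := hl.1
            have hb2 : l ≤ min max_len (n - pos) := by omega
            have hb3 : l ≤ n - pos := by omega
            exact ih j' (pos + l)
              (tokens ++ [PySem.Str.slice text (some pos) (some (pos + l))]) acc
              (by omega) (by omega) (by omega)
              (by simp only [List.length_append, List.length_cons, List.length_nil]; push_cast at hj ⊢; omega)
          rw [PySem.List.foldl_congr_mem _ _ _ _ hcong, PySem.List.foldl_append_eq_flatMap]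
          simp only [Wtok]
          congr 1
          rw [List.map_flatMap]
          refine List.flatMap_congr (fun l hl => ?_)
          rw [List.map_map]
          refine List.map_congr_left (fun rest hrest => ?_)
          simp [List.append_assoc]

theorem tokTable_eq (text : String) (n max_len : Int) (j : Nat) :
    tokTable text n max_len ((PySem.List.pyRange 0 (n + 1) 1).map (Wtok text n max_len j))
      = (PySem.List.pyRange 0 (n + 1) 1).map (Wtok text n max_len (j + 1)) := by
  simp only [tokTable]
  refine List.map_congr_left (fun pos hpos => ?_)
  rw [PySem.List.mem_pyRange_one] at hpos
  conv_rhs => rw [Wtok]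
  refine List.flatMap_congr (fun l hl => ?_)
  rw [PySem.List.mem_pyRange_one] at hl
  rw [PySem.List.pyGetD_map_pyRange_of_nonneg (Wtok text n max_len j) (n + 1) (pos + l) []
    (by omega) (by omega)]

theorem Wtok_all_empty (text : String) (n max_len : Int) (j : Nat)
    (h : ∀ pos : Int, 0 ≤ pos → pos ≤ n → Wtok text n max_len j pos = []) :
    ∀ (m : Nat) (pos : Int), 0 ≤ pos → pos ≤ n → Wtok text n max_len (j + m) pos = [] := by
  intro m
  induction m with
  | zero => intro pos h0 h1; simpa using h pos h0 h1
  | succ m ihm =>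
    intro pos h0 h1
    show Wtok text n max_len ((j + m) + 1) pos = []
    simp only [Wtok]
    apply List.flatMap_eq_nil_iff.mpr
    intro l hl
    rw [PySem.List.mem_pyRange_one] at hl
    by_cases hin : pos + l ≤ n
    · rw [ihm (pos + l) (by omega) hin]; simp
    · rw [Wtok_empty text n max_len (j + m) (pos + l) (Or.inl (by omega))]; simp

theorem tokLoop_eq (text : String) (n max_len : Int) (hn : 0 ≤ n) (steps j : Nat) :
    tokLoop text n max_len steps ((PySem.List.pyRange 0 (n + 1) 1).map (Wtok text n max_len j))
      = Wtok text n max_len (j + steps) 0 := by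
  induction steps generalizing j with
  | zero =>
    simp only [tokLoop]
    rw [PySem.List.pyGetD_map_pyRange_of_nonneg (Wtok text n max_len j) (n + 1) 0 []
      le_rfl (by omega)]
    norm_num
  | succ steps ihs =>
    simp only [tokLoop]
    rw [tokTable_eq]
    by_cases hany : (((PySem.List.pyRange 0 (n + 1) 1).map (Wtok text n max_len (j + 1))).any
        (fun t => !t.isEmpty)) = true
    · rw [if_pos hany, ihs (j + 1)]
      congr 1
      omega
    · rw [if_neg hany]
      have hall : ∀ pos : Int, 0 ≤ pos → pos ≤ n → Wtok text n max_len (j + 1) pos = [] := by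
        intro pos h0 h1
        rw [List.any_eq_true] at hany
        push Not at hany
        have hmem : Wtok text n max_len (j + 1) pos
            ∈ (PySem.List.pyRange 0 (n + 1) 1).map (Wtok text n max_len (j + 1)) :=
          List.mem_map_of_mem (PySem.List.mem_pyRange_one.mpr ⟨h0, by omega⟩)
        have := hany _ hmem
        simpa using this
      have hres := Wtok_all_empty text n max_len (j + 1) hall steps 0 le_rfl hn
      rw [show j + (steps + 1) = (j + 1) + steps from by omega]
      exact hres.symm

theorem init_table (text : String) (n : Int) (max_len : Int) (hn : 0 ≤ n) :
    List.replicate n.toNat ([] : List (List String)) ++ [[[]]]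
      = (PySem.List.pyRange 0 (n + 1) 1).map (Wtok text n max_len 0) := by
  rw [PySem.List.pyRange_one]
  have hlen : (n + 1 - 0).toNat = n.toNat + 1 := by omega
  rw [hlen, List.range_succ, List.map_append, List.map_append]
  congr 1
  · symm
    apply List.eq_replicate_iff.mpr
    refine ⟨by simp, ?_⟩
    intro b hb
    simp only [List.map_map, List.mem_map, List.mem_range, Function.comp] at hb
    obtain ⟨k, hk, rfl⟩ := hb
    simp only [Wtok]
    rw [if_neg (by omega)]
  · simp only [List.map_cons, List.map_nil]
    rw [show Wtok text n max_len 0 (0 + (n.toNat : Int)) = [[]] from by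
      simp only [Wtok]; rw [if_pos (by omega)]]

-- ===== VERDICT (by name: the statement is the Claim_ definition above) =====
theorem find_tokenizations_spec : Claim_equal_find_tokenizations := by
  intro text target max_len _
  unfold Spec_find_tokenizations find_tokenizations find_tokenizations_alt
  have hn : 0 ≤ PySem.Str.len text := by rw [PySem.Str.len_eq]; omega
  by_cases ht : target < 0
  · rw [if_pos ht]
    simp only [btA, List.length_nil, Nat.cast_zero]
    rw [if_neg (by omega)]
    by_cases hz : PySem.Str.len text ≤ 0
    · rw [if_pos hz]
    · rw [if_neg hz]
      by_cases hp : PySem.Str.len text - 0 < target - 0 ∨ (target - 0) * max_len < PySem.Str.len text - 0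
      · rw [if_pos hp]
      · rw [if_neg hp]
        push Not at hp
        have hml : max_len < 0 := by nlinarith [hp.1, hp.2]
        rw [PySem.List.pyRange_one_eq_nil (by omega)]
        simp
  · rw [if_neg ht]
    rw [btA_eq text target max_len (PySem.Str.len text) ((PySem.Str.len text).toNat + 1)
      target.toNat 0 [] [] le_rfl hn (by omega) (by simp only [List.length_nil, Nat.cast_zero]; omega)]
    rw [init_table text (PySem.Str.len text) max_len hn,
      tokLoop_eq text (PySem.Str.len text) max_len hn target.toNat 0]
    simp
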